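-- pv_equiv track=rewrite | github.com/No-Stream/centaur-music | code_musics/composition.py | _inside_out_order
-- ===== SOURCE A (Python) =====
-- def _inside_out_order(count: int) -> list[int]:
--     if count <= 0:
--         return []
--
--     order = [count // 2]
--     left_index = (count // 2) - 1
--     right_index = (count // 2) + 1
--     while len(order) < count:
--         if left_index >= 0:
--             order.append(left_index)
--             left_index -= 1
--         if right_index < count:
--             order.append(right_index)
--             right_index += 1
--     return order
-- ===== SOURCE B (Python) =====
-- def _inside_out_order(count: int) -> list[int]:
--     mid = count // 2
--     return [mid - (p + 1) // 2 if p % 2 else mid + p // 2 for p in range(count)]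
-- ===== Notes on version B (the rewrite author's own statement) =====
-- stated objective: alternative
-- what changed: Replaced A's stateful two-pointer while-loop with a closed-form formula mapping each output position directly to its index (odd positions count down from the middle, even positions count up), produced by a single comprehension over the position range.
import Mathlib
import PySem

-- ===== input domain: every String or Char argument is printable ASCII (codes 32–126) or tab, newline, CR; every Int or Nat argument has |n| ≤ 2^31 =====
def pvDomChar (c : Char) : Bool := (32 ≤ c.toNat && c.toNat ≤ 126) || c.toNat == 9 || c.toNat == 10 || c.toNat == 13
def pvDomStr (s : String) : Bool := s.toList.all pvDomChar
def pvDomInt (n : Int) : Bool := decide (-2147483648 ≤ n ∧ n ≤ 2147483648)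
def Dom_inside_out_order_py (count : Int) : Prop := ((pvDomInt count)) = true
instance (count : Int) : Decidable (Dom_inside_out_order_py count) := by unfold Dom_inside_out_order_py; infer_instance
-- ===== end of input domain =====

-- B replaces A's stateful two-pointer while-loop by a closed-form formula for the element at each output position (different algorithm, similar cost).

-- ===== PORT A =====
-- A's while-loop; fuel = count.toNat only makes the recursion total, each step is A's loop body verbatim.
def insideLoopA (count : Int) (order : List Int) (l r : Int) : Nat → List Int
  | 0 => order
  | Nat.succ f =>
    if (order.length : Int) < count then
      let p1 := if l ≥ 0 then (order ++ [l], l - 1) else (order, l)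
      let p2 := if r < count then (p1.1 ++ [r], r + 1) else (p1.1, r)
      insideLoopA count p2.1 p1.2 p2.2 f
    else order

def inside_out_order_py (count : Int) : List Int :=
  if count ≤ 0 then []
  else
    insideLoopA count [PySem.Int.floordiv count 2]
      (PySem.Int.floordiv count 2 - 1) (PySem.Int.floordiv count 2 + 1) count.toNat

-- ===== PORT B =====
-- closed form: output position p holds mid - (p+1)//2 for odd p, mid + p//2 for even p
def inside_out_order_py_alt (count : Int) : List Int :=
  let mid := PySem.Int.floordiv count 2
  (PySem.List.pyRange 0 count 1).map (fun p =>
    if PySem.Int.mod p 2 ≠ 0 then mid - PySem.Int.floordiv (p + 1) 2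
    else mid + PySem.Int.floordiv p 2)

-- ===== PRECONDITION & SPEC =====
def Spec_inside_out_order_py (count : Int) (out : List Int) : Prop := out = inside_out_order_py_alt count
instance (count : Int) (out : List Int) : Decidable (Spec_inside_out_order_py count out) := by unfold Spec_inside_out_order_py; infer_instance

-- ===== CLAIM =====
def Claim_equal_inside_out_order_py : Prop := ∀ (count : Int), Dom_inside_out_order_py count → Spec_inside_out_order_py count (inside_out_order_py count)

-- ===== LEMMAS AND PROOFS =====

-- abbreviation used only in the proofs for B's per-position formula
def posVal (mid p : Int) : Int :=
  if PySem.Int.mod p 2 ≠ 0 then mid - PySem.Int.floordiv (p + 1) 2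
  else mid + PySem.Int.floordiv p 2

theorem posVal_even (mid p : Int) (_h0 : 0 ≤ p) (h : p % 2 = 0) :
    posVal mid p = mid + p / 2 := by
  unfold posVal
  rw [PySem.Int.mod_eq_emod_of_pos (by omega), PySem.Int.floordiv_eq_ediv_of_pos (by omega)]
  simp [h]

theorem posVal_odd (mid p : Int) (_h0 : 0 ≤ p) (h : p % 2 = 1) :
    posVal mid p = mid - (p + 1) / 2 := by
  unfold posVal
  rw [PySem.Int.mod_eq_emod_of_pos (by omega), PySem.Int.floordiv_eq_ediv_of_pos (by omega)]
  simp [h]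

-- The loop returns immediately once the accumulator has reached full length (any fuel).
theorem insideLoopA_exit (count : Int) (order : List Int) (l r : Int) (f : Nat)
    (h : ¬ (order.length : Int) < count) : insideLoopA count order l r f = order := by
  cases f <;> simp [insideLoopA, h]

-- The loop, run from pointers l = mid-1-j and r = mid+1+j, produces exactly the tail of B's
-- closed-form list from position 2j+1 on, appended to the accumulator.
theorem insideLoopA_closed (count mid : Int) (hm : 0 ≤ mid)
    (hc : count = 2 * mid ∨ count = 2 * mid + 1) :
    ∀ (f : Nat) (order : List Int) (j : Int), 0 ≤ j →
    (order.length : Int) = 2 * j + 1 →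
    mid - j ≤ (f : Int) →
    insideLoopA count order (mid - 1 - j) (mid + 1 + j) f =
      order ++ (PySem.List.pyRange (2 * j + 1) count 1).map (posVal mid) := by
  intro f
  induction f with
  | zero =>
    intro order j hj hlen hf

    have he : PySem.List.pyRange (2 * j + 1) count 1 = [] :=
      PySem.List.pyRange_one_eq_nil (by omega)
    rw [insideLoopA_exit count order _ _ 0 (by omega), he]
    simp
  | succ f ih =>
    intro order j hj hlen hf

    by_cases hdone : 2 * j + 1 ≥ count
    · have he : PySem.List.pyRange (2 * j + 1) count 1 = [] :=
        PySem.List.pyRange_one_eq_nil (by omega)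
      rw [insideLoopA_exit count order _ _ _ (by omega), he]
      simp
    · rw [not_le] at hdone
      have hL : mid - 1 - j ≥ 0 := by omega
      have hcons1 : PySem.List.pyRange (2 * j + 1) count 1
          = (2 * j + 1) :: PySem.List.pyRange (2 * j + 1 + 1) count 1 :=
        PySem.List.pyRange_one_cons (by omega)
      rw [show (2 * j + 1 + 1 : Int) = 2 * j + 2 from by ring] at hcons1
      have hv1 : posVal mid (2 * j + 1) = mid - 1 - j := by
        rw [posVal_odd mid (2 * j + 1) (by omega) (by omega)]; omega
      by_cases hR : mid + 1 + j < count
      · -- both sides emit this round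
        have hcons2 : PySem.List.pyRange (2 * j + 2) count 1
            = (2 * j + 2) :: PySem.List.pyRange (2 * j + 2 + 1) count 1 :=
          PySem.List.pyRange_one_cons (by omega)
        rw [show (2 * j + 2 + 1 : Int) = 2 * j + 3 from by ring] at hcons2
        have hv2 : posVal mid (2 * j + 2) = mid + 1 + j := by
          rw [posVal_even mid (2 * j + 2) (by omega) (by omega)]; omega
        have hstep := ih (order ++ [mid - 1 - j] ++ [mid + 1 + j]) (j + 1)
          (by omega) (by simp; push_cast; omega) (by omega)
        simp only [insideLoopA, if_pos (show ((order.length : Int)) < count by omega),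
          if_pos (show mid - 1 - j ≥ 0 from hL), if_pos hR]
        rw [show mid - 1 - j - 1 = mid - 1 - (j + 1) from by ring,
            show mid + 1 + j + 1 = mid + 1 + (j + 1) from by ring, hstep,
            hcons1, hcons2]
        have e3 : 2 * (j + 1) + 1 = 2 * j + 3 := by ring
        simp [e3, hv1, hv2]
      · -- right pointer exhausted: count = 2*mid, j = mid-1, one last left element
        have hj' : j = mid - 1 ∧ count = 2 * mid := by omega
        have hnil : PySem.List.pyRange (2 * j + 2) count 1 = [] :=
          PySem.List.pyRange_one_eq_nil (by omega)
        simp only [insideLoopA, if_pos (show ((order.length : Int)) < count by omega),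
          if_pos (show mid - 1 - j ≥ 0 from hL), if_neg hR]
        rw [insideLoopA_exit count (order ++ [mid - 1 - j]) _ _ f (by simp; omega)]
        rw [hcons1, hnil]
        simp [hv1]

-- ===== VERDICT =====
theorem inside_out_order_py_spec : Claim_equal_inside_out_order_py := by
  intro count _
  unfold Spec_inside_out_order_py inside_out_order_py inside_out_order_py_alt
  by_cases h : count ≤ 0
  · simp [h, PySem.List.pyRange_one_eq_nil h]
  · have hpos : 0 < count := by omega
    have hdiv : PySem.Int.floordiv count 2 = count / 2 :=
      PySem.Int.floordiv_eq_ediv_of_pos (by omega)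
    set mid := count / 2 with hmid
    have hm : 0 ≤ mid := by omega
    have hc : count = 2 * mid ∨ count = 2 * mid + 1 := by omega
    rw [if_neg h, hdiv]
    have hcons : PySem.List.pyRange 0 count 1 = 0 :: PySem.List.pyRange 1 count 1 :=
      PySem.List.pyRange_one_cons (by omega)
    have h0 : posVal mid 0 = mid := by
      rw [posVal_even mid 0 (by omega) (by omega)]; omega
    have := insideLoopA_closed count mid hm hc count.toNat [mid] 0 (by omega)
      (by simp) (by omega)
    simp only [show mid - 1 - 0 = mid - 1 by ring, show mid + 1 + 0 = mid + 1 by ring,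
      show 2 * (0:Int) + 1 = 1 by ring] at this
    rw [this, hcons]
    show [mid] ++ List.map (posVal mid) (PySem.List.pyRange 1 count 1)
        = List.map (posVal mid) (0 :: PySem.List.pyRange 1 count 1)
    simp [h0]
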